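-- pv_equiv track=rewrite | github.com/rmtew/local-ai-server | tools/wer_bench.py | normalize_for_wer
-- ===== SOURCE A (Python) =====
-- from typing import List, Optional, Tuple
--
-- def normalize_for_wer(text: str) -> List[str]:
--     """Normalize text for WER: uppercase, strip punctuation, split to words.
--
--     LibriSpeech ground truth is already uppercase with no punctuation.
--     Model output may have mixed case and punctuation.
--     """
--     out = []
--     for ch in text:
--         if ch.isalnum() or ch.isspace():
--             out.append(ch.upper())
--         else:
--             out.append(" ")
--     return "".join(out).split()
-- ===== SOURCE B (Python) =====
-- def normalize_for_wer(text: str):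
--     """One pass: build words directly; any non-alnum char acts as a separator."""
--     words = []
--     buf = []
--     for ch in text:
--         if ch.isalnum():
--             buf.append(ch.upper())
--         else:
--             if buf:
--                 words.append("".join(buf))
--                 buf = []
--     if buf:
--         words.append("".join(buf))
--     return words
-- ===== Notes on version B (the rewrite author's own statement) =====
-- stated objective: alternative
-- what changed: B builds the word list directly in one pass with a current-word buffer flushed at every non-alphanumeric char, instead of constructing an intermediate normalized string and then calling .split().
import Mathlib
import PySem

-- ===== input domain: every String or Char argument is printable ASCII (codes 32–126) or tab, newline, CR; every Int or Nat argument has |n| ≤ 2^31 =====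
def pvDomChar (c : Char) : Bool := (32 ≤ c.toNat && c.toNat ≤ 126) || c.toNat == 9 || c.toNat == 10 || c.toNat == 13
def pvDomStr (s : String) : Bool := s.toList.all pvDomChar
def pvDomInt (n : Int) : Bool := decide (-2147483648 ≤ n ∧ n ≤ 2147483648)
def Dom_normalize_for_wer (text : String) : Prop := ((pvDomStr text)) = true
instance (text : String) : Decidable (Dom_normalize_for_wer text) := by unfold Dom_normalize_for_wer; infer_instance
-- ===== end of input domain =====

-- B builds each word directly with a char buffer in one pass (flush on every non-alnum char);
-- A normalizes the whole string (map to upper-or-space) and then splits it on whitespace.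

-- ===== PORT A =====
def normalize_for_wer (text : String) : List String :=
  let out := text.toList.foldl (fun (acc : List Char) ch =>
    if PySem.Chars.isalnum ch || PySem.Chars.isspace ch then acc ++ [PySem.Chars.upperChar ch]
    else acc ++ [' ']) []
  (PySem.Chars.split₀ out).map (fun w => String.mk w)

-- ===== PORT B =====
def pvStepB (st : List String × List Char) (ch : Char) : List String × List Char :=
  if PySem.Chars.isalnum ch then (st.1, st.2 ++ [PySem.Chars.upperChar ch])
  else if st.2.isEmpty then st else (st.1 ++ [String.mk st.2], [])

def normalize_for_wer_alt (text : String) : List String :=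
  let st := text.toList.foldl pvStepB ([], [])
  if st.2.isEmpty then st.1 else st.1 ++ [String.mk st.2]

-- ===== PRECONDITION & SPEC =====
def Spec_normalize_for_wer (text : String) (out : List String) : Prop := out = normalize_for_wer_alt text
instance (text : String) (out : List String) : Decidable (Spec_normalize_for_wer text out) := by unfold Spec_normalize_for_wer; infer_instance

-- ===== CLAIM (what is proved, stated in full; the proofs are below) =====
def Claim_equal_normalize_for_wer : Prop := ∀ (text : String), Dom_normalize_for_wer text → Spec_normalize_for_wer text (normalize_for_wer text)

-- ===== LEMMAS AND PROOFS =====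

def pvMapA (ch : Char) : Char :=
  if PySem.Chars.isalnum ch || PySem.Chars.isspace ch then PySem.Chars.upperChar ch else ' '

lemma pvFoldA_eq_map : ∀ (cs : List Char) (acc : List Char),
    cs.foldl (fun (acc : List Char) ch =>
      if PySem.Chars.isalnum ch || PySem.Chars.isspace ch then acc ++ [PySem.Chars.upperChar ch]
      else acc ++ [' ']) acc = acc ++ cs.map pvMapA := by
  have hstep : (fun (acc : List Char) ch =>
      if PySem.Chars.isalnum ch || PySem.Chars.isspace ch then acc ++ [PySem.Chars.upperChar ch]
      else acc ++ [' ']) = fun (acc : List Char) ch => acc ++ [pvMapA ch] := by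
    funext a ch
    by_cases h : (PySem.Chars.isalnum ch || PySem.Chars.isspace ch) = true <;> simp [pvMapA, h]
  rw [hstep]
  intro cs
  induction cs with
  | nil => simp
  | cons c cs ih => intro acc; simp [ih]

lemma pv_alnum_upper_not_space (c : Char) (h : PySem.Chars.isalnum c = true) :
    PySem.Chars.isspace (PySem.Chars.upperChar c) = false := by
  have hA : 'A'.val.toNat = 65 := rfl
  have hZ : 'Z'.val.toNat = 90 := rfl
  have ha : 'a'.val.toNat = 97 := rfl
  have hz : 'z'.val.toNat = 122 := rfl
  have h0 : '0'.val.toNat = 48 := rfl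
  have h9 : '9'.val.toNat = 57 := rfl
  simp only [PySem.Chars.isalnum, PySem.Chars.isalpha, PySem.Chars.isupper, PySem.Chars.islower,
    PySem.Chars.isdigit, Bool.or_eq_true, Bool.and_eq_true, decide_eq_true_eq, Char.le_def,
    UInt32.le_iff_toNat_le, hA, hZ, ha, hz, h0, h9] at h
  have hch : c.toNat = c.val.toNat := rfl
  have hv : ∀ n : Nat, 48 ≤ n → n ≤ 90 → (Char.ofNat n).toNat = n := by
    intro n h1 h2
    have : Nat.isValidChar n := Or.inl (by omega)
    simp [Char.ofNat, this, Char.toNat, Char.ofNatAux]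
  simp only [PySem.Chars.upperChar, PySem.Chars.islower, Char.le_def, Bool.and_eq_true,
    decide_eq_true_eq, UInt32.le_iff_toNat_le, ha, hz, hch]
  split_ifs with hl
  · simp only [PySem.Chars.isspace, hv (c.val.toNat - 32) (by omega) (by omega),
      Bool.or_eq_false_iff, Bool.and_eq_false_iff, decide_eq_false_iff_not]
    omega
  · simp only [PySem.Chars.isspace, hch, Bool.or_eq_false_iff, Bool.and_eq_false_iff,
      decide_eq_false_iff_not]
    omega

lemma pv_lower_not_space (c : Char) (hs : PySem.Chars.isspace c = true) :
    PySem.Chars.islower c = false := by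
  have ha : 'a'.val.toNat = 97 := rfl
  have hz : 'z'.val.toNat = 122 := rfl
  have hch : c.toNat = c.val.toNat := rfl
  simp only [PySem.Chars.isspace, Bool.or_eq_true, Bool.and_eq_true, decide_eq_true_eq, hch] at hs
  simp only [PySem.Chars.islower, Char.le_def, UInt32.le_iff_toNat_le, Bool.and_eq_false_iff,
    decide_eq_false_iff_not, not_le, ha, hz]
  omega

lemma pv_not_alnum_space (c : Char) (h : PySem.Chars.isalnum c = false) :
    PySem.Chars.isspace (pvMapA c) = true := by
  simp only [pvMapA, h, Bool.false_or]
  by_cases hs : PySem.Chars.isspace c = true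
  · simp [hs, PySem.Chars.upperChar, pv_lower_not_space c hs]
  · simp only [Bool.not_eq_true] at hs
    simp only [hs, Bool.false_eq_true, if_false]
    decide

lemma pv_go_eq : ∀ (cs : List Char) (buf : List Char) (acc : List (List Char)),
    (PySem.Chars.split₀.go (cs.map pvMapA) buf.reverse acc).map (fun w => String.mk w) =
      (let st := cs.foldl pvStepB (acc.reverse.map (fun w => String.mk w), buf)
       if st.2.isEmpty then st.1 else st.1 ++ [String.mk st.2]) := by
  intro cs
  induction cs with
  | nil =>
    intro buf acc
    simp only [List.map_nil, List.foldl_nil, PySem.Chars.split₀.go]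
    cases buf <;> simp
  | cons c cs ih =>
    intro buf acc
    simp only [List.map_cons, List.foldl_cons, PySem.Chars.split₀.go]
    by_cases h : PySem.Chars.isalnum c = true
    · have hm : pvMapA c = PySem.Chars.upperChar c := by simp [pvMapA, h]
      rw [hm, pv_alnum_upper_not_space c h, if_neg (by simp)]
      have hr : PySem.Chars.upperChar c :: buf.reverse
          = (buf ++ [PySem.Chars.upperChar c]).reverse := by simp
      rw [hr, ih]
      simp [pvStepB, h]
    · have hB : PySem.Chars.isalnum c = false := by simpa using h
      rw [pv_not_alnum_space c hB, if_pos rfl]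
      by_cases hb : buf = []
      · subst hb
        rw [show ([] : List Char).reverse.isEmpty = true from rfl, if_pos rfl]
        have := ih [] acc
        simp only [List.reverse_nil] at this
        rw [this]
        simp [pvStepB, hB]
      · have hne : buf.reverse.isEmpty = false := by simp [hb]
        rw [hne, if_neg (by simp), List.reverse_reverse]
        have := ih [] (buf :: acc)
        simp only [List.reverse_nil] at this
        rw [this]
        simp [pvStepB, hB, hb]

-- ===== VERDICT (by name: the statement is the Claim_ definition above) =====
theorem normalize_for_wer_spec : Claim_equal_normalize_for_wer := by
  intro text _
  unfold Spec_normalize_for_wer normalize_for_wer normalize_for_wer_alt PySem.Chars.split₀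
  rw [pvFoldA_eq_map]
  simpa using pv_go_eq text.toList [] []
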